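-- pv_equiv track=rewrite | github.com/chiy4728/Vless_crawl | extract_links.py | advanced_deduplication
-- ===== SOURCE A (Python) =====
-- def advanced_deduplication(links):
--     """
--     对代理链接列表进行高级去重。
--     如果两个链接的核心部分（协议、地址、端口）相同，
--     则只保留参数最全（即字符串最长）的那个链接。
--     """
--     processed_links = {}
--
--     for link in links:
--         # 尝试将链接的参数和片段部分分开，以获取其“基础”部分
--         # 例如: vless://...@host:port?params#name -> vless://...@host:port
--         try:
--             # 对于 vmess:// 链接，因为后面是 Base64 blob，没有明文的 ? 或 #，
--             # 所以这里的逻辑会将整个 VMess 链接视为基础部分。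
--             # 这意味着 VMess 目前仅支持“完全一致”的去重，这对于 Base64 链接是合理的。
--
--             query_start = link.find('?')
--             fragment_start = link.find('#')
--
--             if query_start != -1 and fragment_start != -1:
--                 end_pos = min(query_start, fragment_start)
--             elif query_start != -1:
--                 end_pos = query_start
--             elif fragment_start != -1:
--                 end_pos = fragment_start
--             else:
--                 end_pos = -1
--
--             if end_pos != -1:
--                 base_link = link[:end_pos]
--             else:
--                 base_link = link
--         except Exception:
--             base_link = link
--
--         # 核心去重逻辑
--         if base_link not in processed_links or len(link) > len(processed_links[base_link]):
--             processed_links[base_link] = link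
--
--     return list(processed_links.values())
-- ===== SOURCE B (Python) =====
-- def advanced_deduplication(links):
--     """Dedupe by base part (prefix up to the earliest '?'/'#'): walk the list
--     once recording each base the first time it appears, and at that moment pick
--     the group winner by a full scan of the whole input (max by length, first on
--     ties); no dict of running winners is maintained."""
--     def base(link):
--         cuts = [i for i in (link.find('?'), link.find('#')) if i != -1]
--         return link[:min(cuts)] if cuts else link
--
--     out = []
--     seen = []
--     for link in links:
--         b = base(link)
--         if b not in seen:
--             seen.append(b)
--             out.append(max((l for l in links if base(l) == b), key=len))
--     return out
-- ===== Notes on version B (the rewrite author's own statement) =====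
-- stated objective: alternative
-- what changed: Drops A's dict of running per-base winners entirely: B walks the list keeping only a 'seen bases' list and, at each base's first appearance, selects that group's winner by a full max-by-length scan of the whole input (trades A's O(n) single-pass dict for a dict-free quadratic nested scan).
import Mathlib
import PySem

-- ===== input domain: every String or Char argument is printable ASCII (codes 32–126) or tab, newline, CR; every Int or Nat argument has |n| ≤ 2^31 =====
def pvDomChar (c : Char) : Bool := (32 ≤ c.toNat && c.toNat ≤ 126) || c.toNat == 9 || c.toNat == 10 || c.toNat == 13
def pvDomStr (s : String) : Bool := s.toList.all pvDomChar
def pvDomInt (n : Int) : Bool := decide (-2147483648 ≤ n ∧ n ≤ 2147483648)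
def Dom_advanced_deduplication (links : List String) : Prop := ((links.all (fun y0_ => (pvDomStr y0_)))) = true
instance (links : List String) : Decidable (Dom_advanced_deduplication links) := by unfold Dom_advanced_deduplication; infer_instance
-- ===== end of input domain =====

-- B drops A's dict of running per-base winners: it walks the list keeping only a
-- 'seen bases' list and, at each base's first appearance, picks that group's winner
-- by a full max-by-length scan of the whole input; objective: alternative algorithm.

-- ===== PORT A =====
-- base part: prefix up to the earliest of the first '?' / '#' (A's if/elif chain)
def adBaseA (link : String) : String :=
  let queryStart := PySem.Str.find link "?"
  let fragmentStart := PySem.Str.find link "#"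
  let endPos : Int :=
    if queryStart ≠ -1 ∧ fragmentStart ≠ -1 then min queryStart fragmentStart
    else if queryStart ≠ -1 then queryStart
    else if fragmentStart ≠ -1 then fragmentStart
    else -1
  if endPos ≠ -1 then PySem.Str.slice link none (some endPos) else link

def advanced_deduplication (links : List String) : List String :=
  (links.foldl
    (fun processed link =>
      let baseLink := adBaseA link
      match processed.get? baseLink with
      | none => processed.insert baseLink link
      | some prev =>
        if prev.length < link.length then processed.insert baseLink link else processed)
    PySem.Dict.empty).values

-- ===== PORT B =====
-- base part via the filtered cut list + min (B's comprehension form)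
def adBaseB (link : String) : String :=
  let cuts := ([PySem.Str.find link "?", PySem.Str.find link "#"]).filter (fun i => i ≠ -1)
  match PySem.List.min? cuts (fun i => i) with
  | some m => PySem.Str.slice link none (some m)
  | none => link

-- Source B's max((l for l in links if base(l) == b), key=len); the generator is never
-- empty where B calls it, so the .getD "" default is unreachable there
def adWinner (links : List String) (b : String) : String :=
  (PySem.List.max? (links.filter (fun l => adBaseB l == b)) (fun s => s.length)).getD ""

def advanced_deduplication_alt (links : List String) : List String :=
  (links.foldl
    (fun (st : List String × List String) link =>
      let b := adBaseB link
      if st.1.contains b then st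
      else (st.1 ++ [b], st.2 ++ [adWinner links b]))
    ([], [])).2

-- ===== PRECONDITION & SPEC =====
def Spec_advanced_deduplication (links : List String) (out : List String) : Prop := out = advanced_deduplication_alt links
instance (links : List String) (out : List String) : Decidable (Spec_advanced_deduplication links out) := by unfold Spec_advanced_deduplication; infer_instance

-- ===== CLAIM (what is proved, stated in full; the proofs are below) =====
def Claim_equal_advanced_deduplication : Prop := ∀ (links : List String), Dom_advanced_deduplication links → Spec_advanced_deduplication links (advanced_deduplication links)

-- ===== LEMMAS AND PROOFS =====

-- the two base extractions agree
theorem adBase_eq (link : String) : adBaseB link = adBaseA link := by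
  unfold adBaseA adBaseB
  set q := PySem.Str.find link "?" with hqdef
  set f := PySem.Str.find link "#" with hfdef
  by_cases hq : q = -1 <;> by_cases hf : f = -1
  · simp [hq, hf, PySem.List.min?]
  · simp [hq, hf, PySem.List.min?]
  · simp [hq, hf, PySem.List.min?]
  · have hmin : ¬ min q f = -1 := by
      rcases min_choice q f with h | h <;> rw [h] <;> assumption
    simp only [PySem.List.min?, List.filter, hq, hf, decide_not]
    simp [hq, hf, hmin]
    rw [show (if f < q then some f else some q) = some (min q f) by
      rw [min_def]; split_ifs <;> simp only [Option.some.injEq] <;> omega]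

-- first-appearance list of bases (B's 'seen' accumulator)
def adDedup (p : List String) : List String :=
  p.foldl (fun acc l => if acc.contains (adBaseB l) then acc else acc ++ [adBaseB l]) []

theorem adDedup_snoc (p : List String) (x : String) :
    adDedup (p ++ [x]) =
      if (adDedup p).contains (adBaseB x) then adDedup p else adDedup p ++ [adBaseB x] := by
  simp [adDedup, List.foldl_append]

theorem adDedup_fold_mem (p acc : List String) (b : String) :
    b ∈ p.foldl (fun acc l => if acc.contains (adBaseB l) then acc else acc ++ [adBaseB l]) acc
      ↔ b ∈ acc ∨ ∃ l ∈ p, adBaseB l = b := by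
  induction p generalizing acc with
  | nil => simp
  | cons x t ih =>
    simp only [List.foldl_cons]
    by_cases hc : acc.contains (adBaseB x) = true
    · rw [if_pos hc, ih]
      have hx : adBaseB x ∈ acc := by simpa using hc
      constructor
      · rintro (h | ⟨l, hl, hbl⟩)
        · exact Or.inl h
        · exact Or.inr ⟨l, List.mem_cons_of_mem _ hl, hbl⟩
      · rintro (h | ⟨l, hl, hb⟩)
        · exact Or.inl h
        · rcases List.mem_cons.mp hl with rfl | hl
          · exact Or.inl (hb ▸ hx)
          · exact Or.inr ⟨l, hl, hb⟩
    · rw [if_neg hc, ih]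
      constructor
      · rintro (h | ⟨l, hl, hb⟩)
        · rcases List.mem_append.mp h with h | h
          · exact Or.inl h
          · exact Or.inr ⟨x, by simp, (List.mem_singleton.mp h).symm⟩
        · exact Or.inr ⟨l, by simp [hl], hb⟩
      · rintro (h | ⟨l, hl, hb⟩)
        · exact Or.inl (List.mem_append.mpr (Or.inl h))
        · rcases List.mem_cons.mp hl with rfl | hl
          · exact Or.inl (by simp [hb])
          · exact Or.inr ⟨l, hl, hb⟩

theorem adDedup_mem (p : List String) (b : String) :
    b ∈ adDedup p ↔ ∃ l ∈ p, adBaseB l = b := by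
  rw [adDedup, adDedup_fold_mem]; simp

theorem adFilter_eq_nil (p : List String) (b : String) (h : b ∉ adDedup p) :
    p.filter (fun l => adBaseB l == b) = [] := by
  rw [List.filter_eq_nil_iff]
  intro l hl hb
  exact h ((adDedup_mem p b).mpr ⟨l, hl, by simpa using hb⟩)

theorem adFilter_ne_nil (p : List String) (b : String) (h : b ∈ adDedup p) :
    p.filter (fun l => adBaseB l == b) ≠ [] := by
  obtain ⟨l, hl, hb⟩ := (adDedup_mem p b).mp h
  intro hnil
  rw [List.filter_eq_nil_iff] at hnil
  exact hnil l hl (by simp [hb])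

theorem adMaxLen_append (grp : List String) (x : String) (h : grp ≠ []) :
    (PySem.List.max? (grp ++ [x]) (fun s => s.length)).getD ""
      = if ((PySem.List.max? grp (fun s => s.length)).getD "").length < x.length then x
        else (PySem.List.max? grp (fun s => s.length)).getD "" := by
  cases hF : PySem.List.max? grp (fun s => s.length) with
  | none => exact absurd ((PySem.List.max?_eq_none_iff _ _).mp hF) h
  | some m =>
    simp only [PySem.List.max?, List.foldl_append]
    simp only [PySem.List.max?] at hF
    rw [hF]
    simp only [List.foldl_cons, List.foldl_nil, Option.getD_some]
    split_ifs <;> simp_all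

theorem adWinner_snoc_ne (p : List String) (x : String) (b : String) (h : adBaseB x ≠ b) :
    adWinner (p ++ [x]) b = adWinner p b := by
  unfold adWinner
  rw [List.filter_append, show [x].filter (fun l => adBaseB l == b) = [] by simp [h]]
  simp

theorem adWinner_snoc_new (p : List String) (x : String)
    (h : p.filter (fun l => adBaseB l == adBaseB x) = []) :
    adWinner (p ++ [x]) (adBaseB x) = x := by
  unfold adWinner
  rw [List.filter_append, h]
  simp [PySem.List.max?]

theorem adWinner_snoc_upd (p : List String) (x : String)
    (h : p.filter (fun l => adBaseB l == adBaseB x) ≠ []) :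
    adWinner (p ++ [x]) (adBaseB x)
      = if (adWinner p (adBaseB x)).length < x.length then x else adWinner p (adBaseB x) := by
  unfold adWinner
  rw [List.filter_append, show [x].filter (fun l => adBaseB l == adBaseB x) = [x] by simp]
  exact adMaxLen_append _ x h

-- the dict A's loop holds after processing prefix p
def adRep (p : List String) : PySem.Dict String String :=
  PySem.Dict.mk ((adDedup p).map (fun b => (b, adWinner p b)))

theorem find?_map_key (L : List String) (w : String → String) (b : String) :
    List.find? (fun q => q.1 == b) (L.map (fun b' => (b', w b')))
      = (L.find? (fun b' => b' == b)).map (fun b' => (b', w b')) := by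
  induction L with
  | nil => rfl
  | cons a t ih =>
    rw [List.map_cons, List.find?_cons, List.find?_cons]
    by_cases h : a = b
    · simp [h]
    · simp only [show ((a, w a).1 == b) = false by simpa using h]
      exact ih

theorem find?_beq_of_mem (L : List String) (b : String) (h : b ∈ L) :
    L.find? (fun b' => b' == b) = some b := by
  induction L with
  | nil => simp at h
  | cons a t ih =>
    rcases List.mem_cons.mp h with rfl | h
    · simp
    · by_cases hab : a = b
      · simp [hab]
      · rw [List.find?_cons, show (a == b) = false by simpa using hab]
        exact ih h

theorem find?_beq_of_not_mem (L : List String) (b : String) (h : b ∉ L) :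
    L.find? (fun b' => b' == b) = none := by
  rw [List.find?_eq_none]
  intro x hx
  simp only [beq_iff_eq]
  rintro rfl; exact h hx

theorem adRep_get? (p : List String) (b : String) :
    (adRep p).get? b = if b ∈ adDedup p then some (adWinner p b) else none := by
  unfold adRep PySem.Dict.get?
  rw [find?_map_key]
  by_cases h : b ∈ adDedup p
  · rw [find?_beq_of_mem _ _ h]; simp [h]
  · rw [find?_beq_of_not_mem _ _ h]; simp [h]

theorem adRep_contains_iff (p : List String) (b : String) :
    (adRep p).contains b = true ↔ b ∈ adDedup p := by
  unfold adRep PySem.Dict.contains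
  simp

-- one A-step on adRep p yields adRep (p ++ [x])
theorem adStepA (p : List String) (x : String) :
    (let baseLink := adBaseA x
     match (adRep p).get? baseLink with
     | none => (adRep p).insert baseLink x
     | some prev =>
       if prev.length < x.length then (adRep p).insert baseLink x else adRep p)
      = adRep (p ++ [x]) := by
  rw [show adBaseA x = adBaseB x from (adBase_eq x).symm]
  set b := adBaseB x with hb
  by_cases hmem : b ∈ adDedup p
  · have hfil : p.filter (fun l => adBaseB l == b) ≠ [] := adFilter_ne_nil p b hmem
    have hget : (adRep p).get? b = some (adWinner p b) := by rw [adRep_get?, if_pos hmem]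
    have hcon : (adRep p).contains b = true := (adRep_contains_iff p b).mpr hmem
    have hded : adDedup (p ++ [x]) = adDedup p := by
      rw [adDedup_snoc, if_pos (by simpa using hmem)]
    have hupd := adWinner_snoc_upd p x (hb ▸ hfil)
    simp only [hget]
    by_cases hlt : (adWinner p b).length < x.length
    · rw [if_pos hlt]
      unfold PySem.Dict.insert
      simp only [hcon, if_pos]
      unfold adRep
      rw [hded]
      congr 1
      simp only [List.map_map]
      apply List.map_congr_left
      intro b' hb'
      by_cases hbb : b' = b
      · subst hbb
        simp only [Function.comp_apply, beq_self_eq_true, if_pos]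
        rw [← hb] at hupd
        rw [hupd, if_pos hlt]
      · simp only [Function.comp_apply]
        rw [show (b' == b) = false by simpa using hbb, if_neg (by simp)]
        rw [adWinner_snoc_ne p x b' (by rw [← hb]; exact fun h => hbb h.symm)]
    · rw [if_neg hlt]
      unfold adRep
      rw [hded]
      congr 1
      apply List.map_congr_left
      intro b' hb'
      by_cases hbb : b' = b
      · subst hbb
        rw [← hb] at hupd
        rw [hupd, if_neg hlt]
      · rw [adWinner_snoc_ne p x b' (by rw [← hb]; exact fun h => hbb h.symm)]
  · have hfil : p.filter (fun l => adBaseB l == b) = [] := adFilter_eq_nil p b hmem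
    have hget : (adRep p).get? b = none := by rw [adRep_get?, if_neg hmem]
    have hcon : (adRep p).contains b = false := by
      rw [Bool.eq_false_iff]
      intro h
      exact hmem ((adRep_contains_iff p b).mp h)
    have hded : adDedup (p ++ [x]) = adDedup p ++ [b] := by
      rw [adDedup_snoc, if_neg (by simpa using hmem)]
    simp only [hget]
    unfold PySem.Dict.insert
    simp only [hcon, Bool.false_eq_true, if_false]
    unfold adRep
    rw [hded]
    simp only [List.map_append, List.map_cons, List.map_nil]
    congr 1
    congr 1
    · apply List.map_congr_left
      intro b' hb'
      rw [adWinner_snoc_ne p x b' (by rw [← hb]; intro h; exact hmem (h ▸ hb'))]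
    · rw [hb, adWinner_snoc_new p x (hb ▸ hfil)]

theorem adLoopA (t : List String) (p : List String) :
    t.foldl
      (fun processed link =>
        let baseLink := adBaseA link
        match processed.get? baseLink with
        | none => processed.insert baseLink link
        | some prev =>
          if prev.length < link.length then processed.insert baseLink link else processed)
      (adRep p)
    = adRep (p ++ t) := by
  induction t generalizing p with
  | nil => simp
  | cons x t ih =>
    simp only [List.foldl_cons]
    rw [adStepA p x, ih (p ++ [x]), List.append_assoc]
    rfl

theorem adLoopB (links : List String) (t : List String) (p : List String) :
    t.foldl
      (fun (st : List String × List String) link =>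
        let b := adBaseB link
        if st.1.contains b then st
        else (st.1 ++ [b], st.2 ++ [adWinner links b]))
      (adDedup p, (adDedup p).map (fun b => adWinner links b))
    = (adDedup (p ++ t), (adDedup (p ++ t)).map (fun b => adWinner links b)) := by
  induction t generalizing p with
  | nil => simp
  | cons x t ih =>
    simp only [List.foldl_cons]
    have hstep :
        (let b := adBaseB x
         if (adDedup p).contains b then (adDedup p, (adDedup p).map (fun b => adWinner links b))
         else (adDedup p ++ [b],
           (adDedup p).map (fun b => adWinner links b) ++ [adWinner links b]))
        = (adDedup (p ++ [x]), (adDedup (p ++ [x])).map (fun b => adWinner links b)) := by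
      by_cases hc : (adDedup p).contains (adBaseB x) = true
      · simp only [hc, if_pos, adDedup_snoc]
      · simp only [Bool.false_eq_true, if_false, adDedup_snoc, hc]
        simp
    rw [hstep, ih (p ++ [x]), List.append_assoc]
    rfl

-- ===== VERDICT (by name: the statement is the Claim_ definition above) =====
theorem advanced_deduplication_spec : Claim_equal_advanced_deduplication := by
  intro links _
  unfold Spec_advanced_deduplication advanced_deduplication advanced_deduplication_alt
  rw [show (PySem.Dict.empty : PySem.Dict String String) = adRep [] from rfl]
  rw [adLoopA links []]
  have hB := adLoopB links links []
  rw [show ((adDedup [] : List String), (adDedup []).map (fun b => adWinner links b))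
      = (([] : List String), ([] : List String)) from rfl] at hB
  rw [show ([] : List String) ++ links = links from List.nil_append links] at hB
  rw [hB]
  unfold adRep PySem.Dict.values
  simp
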